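-- pv_equiv track=rewrite | github.com/MrBrantCode/unitest_baseline | mut_generate/mist_train_taco/taco_3674/solution.py | calculate_fire_escape_routes
-- ===== SOURCE A (Python) =====
-- def calculate_fire_escape_routes(T, test_cases):
--     MOD = 10**9 + 7
--
--     def find(a):
--         if parent[a] < 0:
--             return a
--         parent[a] = find(parent[a])
--         return parent[a]
--
--     def union(a, b):
--         a = find(a)
--         b = find(b)
--         if a == b:
--             return
--         if parent[a] < parent[b]:
--             parent[a] += parent[b]
--             parent[b] = a
--         else:
--             parent[b] += parent[a]
--             parent[a] = b
--
--     results = []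
--
--     for case in test_cases:
--         N, M, friendships = case
--         parent = [-1] * (N + 1)
--
--         for a, b in friendships:
--             union(a, b)
--
--         max_routes = 0
--         ways_to_select_captains = 1
--
--         for i in range(1, N + 1):
--             if parent[i] < 0:
--                 max_routes += 1
--                 ways_to_select_captains = ways_to_select_captains * (-1 * parent[i]) % MOD
--
--         results.append((max_routes, ways_to_select_captains))
--
--     return results
-- ===== SOURCE B (Python) =====
-- def calculate_fire_escape_routes(T, test_cases):
--     MOD = 10**9 + 7
--     results = []
--     for N, M, friendships in test_cases:
--         # label-merging with member lists: comp[i] is the label of i's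
--         # component, members[l] lists the nodes currently labelled l;
--         # each merge relabels only the smaller component's members.
--         comp = list(range(N + 1))
--         members = [[i] for i in range(N + 1)]
--         for a, b in friendships:
--             ca, cb = comp[a], comp[b]
--             if ca == cb:
--                 continue
--             if len(members[ca]) > len(members[cb]):
--                 big, small = ca, cb
--             else:
--                 big, small = cb, ca
--             for x in members[small]:
--                 comp[x] = big
--             members[big] = members[big] + members[small]
--             members[small] = []
--         routes = 0
--         ways = 1
--         for i in range(1, N + 1):
--             if comp[i] == i:
--                 routes += 1
--                 ways = ways * len(members[i]) % MOD
--         results.append((routes, ways))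
--     return results
-- ===== Notes on version B (the rewrite author's own statement) =====
-- stated objective: alternative
-- what changed: Replaces A's recursive union-find (path compression + union by size, parent array with negative-size roots) by label merging: comp[] holds each node's component label, members[] the per-label node lists, and each edge relabels only the smaller component's members; the final pass counts label fixpoints and multiplies member-list lengths mod 1e9+7.
-- outside the precondition, e.g. on calculate_fire_escape_routes(1, [(2, 1, [(-1, 2)])]): A returns [(1, 1)], B returns [(2, 1)]
import Mathlib
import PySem

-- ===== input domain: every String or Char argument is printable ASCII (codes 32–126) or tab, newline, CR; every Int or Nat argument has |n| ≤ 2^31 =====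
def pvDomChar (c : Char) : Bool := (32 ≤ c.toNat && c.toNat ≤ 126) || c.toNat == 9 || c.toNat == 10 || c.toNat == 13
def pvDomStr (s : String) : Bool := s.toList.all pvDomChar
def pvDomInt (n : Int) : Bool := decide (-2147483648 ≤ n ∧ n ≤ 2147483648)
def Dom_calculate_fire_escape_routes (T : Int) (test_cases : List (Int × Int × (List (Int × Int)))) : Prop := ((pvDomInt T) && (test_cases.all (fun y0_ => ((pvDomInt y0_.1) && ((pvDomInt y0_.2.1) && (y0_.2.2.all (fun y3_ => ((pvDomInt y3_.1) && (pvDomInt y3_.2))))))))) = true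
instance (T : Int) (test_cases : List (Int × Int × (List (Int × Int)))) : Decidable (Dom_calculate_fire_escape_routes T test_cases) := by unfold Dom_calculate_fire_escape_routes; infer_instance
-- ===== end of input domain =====

-- B replaces A's recursive union–find (path compression + union by size) by
-- label merging with per-label member lists, relabelling the smaller class
-- (objective: alternative algorithm of similar cost).

-- ===== PORT A =====
def pvMOD : Int := 1000000007

-- Python's parent[x] reads/writes: under Pre_ every index is nonnegative and
-- in range, where xs[x] = xs.getD x.toNat 0 and xs[x] = v is xs.set x.toNat v
-- (exact there; Pre_ excludes negative endpoints, where Python wraps around).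
-- The recursion find() is given fuel p.length + 1; under Pre_ the parent
-- forest is acyclic with chains shorter than that, so the fuel never runs out.
def findA (p : List Int) : Nat → Int → List Int × Int
  | 0, a => (p, a)
  | f+1, a =>
    if p.getD a.toNat 0 < 0 then (p, a)
    else
      let r := findA p f (p.getD a.toNat 0)
      (r.1.set a.toNat r.2, r.2)

def unionA (p : List Int) (a b : Int) : List Int :=
  let fa := findA p (p.length + 1) a
  let fb := findA fa.1 (fa.1.length + 1) b
  let p2 := fb.1
  if fa.2 = fb.2 then p2
  else if p2.getD fa.2.toNat 0 < p2.getD fb.2.toNat 0 then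
    (p2.set fa.2.toNat (p2.getD fa.2.toNat 0 + p2.getD fb.2.toNat 0)).set fb.2.toNat fa.2
  else
    (p2.set fb.2.toNat (p2.getD fb.2.toNat 0 + p2.getD fa.2.toNat 0)).set fa.2.toNat fb.2

def caseA (N : Int) (fr : List (Int × Int)) : Int × Int :=
  let p := fr.foldl (fun q ab => unionA q ab.1 ab.2) (List.replicate (N+1).toNat (-1))
  (PySem.List.pyRange 1 (N+1) 1).foldl
    (fun acc i =>
      if p.getD i.toNat 0 < 0 then
        (acc.1 + 1, PySem.Int.mod (acc.2 * (-1 * p.getD i.toNat 0)) pvMOD)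
      else acc) (0, 1)

def calculate_fire_escape_routes (T : Int) (test_cases : List (Int × Int × (List (Int × Int)))) : List (Int × Int) :=
  test_cases.foldl (fun res c => res ++ [caseA c.1 c.2.2]) []

-- ===== PORT B =====
-- comp[i] is the label of i's component, members[l] the nodes labelled l;
-- each merge relabels only the smaller component's members (same indexing
-- convention as in port A: all indices are in range and nonnegative on Pre_).
def mergeB (st : List Int × List (List Int)) (a b : Int) : List Int × List (List Int) :=
  let ca := st.1.getD a.toNat 0
  let cb := st.1.getD b.toNat 0
  if ca = cb then st
  else
    let bs := if (st.2.getD ca.toNat []).length > (st.2.getD cb.toNat []).length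
              then (ca, cb) else (cb, ca)
    let c' := (st.2.getD bs.2.toNat []).foldl (fun cc x => cc.set x.toNat bs.1) st.1
    let m' := (st.2.set bs.1.toNat (st.2.getD bs.1.toNat [] ++ st.2.getD bs.2.toNat [])).set bs.2.toNat []
    (c', m')

def caseB (N : Int) (fr : List (Int × Int)) : Int × Int :=
  let st := fr.foldl (fun st ab => mergeB st ab.1 ab.2)
    (PySem.List.pyRange 0 (N+1) 1, (PySem.List.pyRange 0 (N+1) 1).map (fun i => [i]))
  (PySem.List.pyRange 1 (N+1) 1).foldl
    (fun acc i =>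
      if st.1.getD i.toNat 0 = i then
        (acc.1 + 1, PySem.Int.mod (acc.2 * ((st.2.getD i.toNat []).length : Int)) pvMOD)
      else acc) (0, 1)

def calculate_fire_escape_routes_alt (T : Int) (test_cases : List (Int × Int × (List (Int × Int)))) : List (Int × Int) :=
  test_cases.foldl (fun res c => res ++ [caseB c.1 c.2.2]) []

-- ===== PRECONDITION & SPEC =====
-- Pre_ excludes cases with a friendship endpoint outside 0..N: on those A
-- either raises IndexError or silently merges via Python's negative-index
-- wraparound, an artefact of the parent-array representation.
def Pre_calculate_fire_escape_routes (T : Int) (test_cases : List (Int × Int × (List (Int × Int)))) : Prop :=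
  ∀ c ∈ test_cases, ∀ e ∈ c.2.2, 0 ≤ e.1 ∧ e.1 ≤ c.1 ∧ 0 ≤ e.2 ∧ e.2 ≤ c.1
instance (T : Int) (test_cases : List (Int × Int × (List (Int × Int)))) : Decidable (Pre_calculate_fire_escape_routes T test_cases) := by unfold Pre_calculate_fire_escape_routes; infer_instance

def pvWitness_calculate_fire_escape_routes : Int × (List (Int × Int × (List (Int × Int)))) :=
  (1, [(3, 2, [(1, 2), (2, 3)])])

def Spec_calculate_fire_escape_routes (T : Int) (test_cases : List (Int × Int × (List (Int × Int)))) (out : List (Int × Int)) : Prop := out = calculate_fire_escape_routes_alt T test_cases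
instance (T : Int) (test_cases : List (Int × Int × (List (Int × Int)))) (out : List (Int × Int)) : Decidable (Spec_calculate_fire_escape_routes T test_cases out) := by unfold Spec_calculate_fire_escape_routes; infer_instance

-- ===== CLAIM (what is proved, stated in full; the proofs are below) =====
def Claim_equal_calculate_fire_escape_routes : Prop := ∀ (T : Int) (test_cases : List (Int × Int × (List (Int × Int)))), Dom_calculate_fire_escape_routes T test_cases → Pre_calculate_fire_escape_routes T test_cases → Spec_calculate_fire_escape_routes T test_cases (calculate_fire_escape_routes T test_cases)

-- ===== LEMMAS AND PROOFS =====

-- Pure (compression-free) root computation with fuel: the semantic anchor.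
def rr (p : List Int) : Nat → Nat → Option Nat
  | 0, _ => none
  | f+1, i => if p.getD i 0 < 0 then some i else rr p f (p.getD i 0).toNat

-- A depth certificate: parents are in range and strictly decrease d.
def IsCert (p : List Int) (d : Nat → Nat) : Prop :=
  ∀ i, i < p.length → 0 ≤ p.getD i 0 →
    (p.getD i 0).toNat < p.length ∧ d (p.getD i 0).toNat < d i

-- The bisimulation invariant between A's parent forest and B's (comp, members).
def BInv (p c : List Int) (m : List (List Int)) : Prop :=
  c.length = p.length ∧ m.length = p.length ∧
  (∀ i, i < p.length → 0 ≤ c.getD i 0 ∧ (c.getD i 0).toNat < p.length ∧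
        rr p (p.length + 1) i = some (c.getD i 0).toNat) ∧
  (∃ d, IsCert p d ∧ ∀ i, i < p.length → d i < (m.getD (c.getD i 0).toNat []).length) ∧
  (∀ l, l < p.length →
     (c.getD l 0 = (l : Int) →
        (m.getD l []).Nodup ∧
        (∀ x : Int, x ∈ m.getD l [] ↔ 0 ≤ x ∧ x.toNat < p.length ∧ c.getD x.toNat 0 = (l : Int))) ∧
     (c.getD l 0 ≠ (l : Int) → m.getD l [] = [])) ∧
  (∀ l, l < p.length → c.getD l 0 = (l : Int) → p.getD l 0 = -((m.getD l []).length))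

theorem getD_set_char {α : Type} (p : List α) (i : Nat) (v d : α) (k : Nat) :
    (p.set i v).getD k d = if k = i ∧ i < p.length then v else p.getD k d := by
  by_cases hk : k = i ∧ i < p.length
  · obtain ⟨rfl, hi⟩ := hk
    simp [List.getD, List.getElem?_set_self, hi]
  · rw [if_neg hk]
    by_cases he : k = i
    · subst he
      have hnl : ¬ k < p.length := fun h => hk ⟨rfl, h⟩
      simp [List.getD, List.getElem?_set, hnl, List.getElem?_eq_none (Nat.le_of_not_lt hnl)]
    · simp [List.getD, List.getElem?_set_ne (by omega : i ≠ k)]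

theorem rr_mono {p : List Int} {f g i x} (h : rr p f i = some x) (hfg : f ≤ g) :
    rr p g i = some x := by
  induction f generalizing i g with
  | zero => simp [rr] at h
  | succ f ih =>
    match g, hfg with
    | g+1, hfg =>
      rw [rr] at h ⊢
      by_cases hp : p.getD i 0 < 0
      · rw [if_pos hp] at h ⊢; exact h
      · rw [if_neg hp] at h ⊢; exact ih h (by omega)

theorem rr_det {p : List Int} {f g i x y} (h1 : rr p f i = some x) (h2 : rr p g i = some y) : x = y := by
  have h1' := rr_mono h1 (Nat.le_max_left f g)
  have h2' := rr_mono h2 (Nat.le_max_right f g)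
  rw [h1'] at h2'; exact Option.some_inj.mp h2'

theorem rr_some_root {p : List Int} {f i x} (h : rr p f i = some x) : p.getD x 0 < 0 := by
  induction f generalizing i with
  | zero => simp [rr] at h
  | succ f ih =>
    rw [rr] at h
    split at h
    · cases h; assumption
    · exact ih h

theorem rr_of_cert {p : List Int} {d} (hc : IsCert p d) :
    ∀ i, i < p.length → ∃ x, rr p (d i + 1) i = some x := by
  intro i hi
  induction hd : d i using Nat.strong_induction_on generalizing i with
  | _ di ih =>
    by_cases h : p.getD i 0 < 0
    · exact ⟨i, by rw [rr, if_pos h]⟩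
    · push_neg at h
      obtain ⟨hlt, hdlt⟩ := hc i hi h
      subst hd
      obtain ⟨x, hx⟩ := ih (d (p.getD i 0).toNat) hdlt _ hlt rfl
      exact ⟨x, by rw [rr, if_neg (by omega)]; exact rr_mono hx (by omega)⟩

theorem rr_strict_descent {p : List Int} {d f i x} (hc : IsCert p d) (hi : i < p.length)
    (h : rr p f i = some x) : d x ≤ d i ∧ (0 ≤ p.getD i 0 → d x < d i) := by
  induction f generalizing i with
  | zero => simp [rr] at h
  | succ f ih =>
    rw [rr] at h
    split at h
    · cases h
      rename_i hneg
      exact ⟨le_refl _, fun h0 => absurd h0 (by omega)⟩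
    · rename_i hp; push_neg at hp
      obtain ⟨hlt, hdlt⟩ := hc i hi hp
      obtain ⟨h1, _⟩ := ih hlt h
      exact ⟨by omega, fun _ => by omega⟩

-- Setting a non-root node's entry to its own root preserves every rr value.
theorem rr_set_to_root {p : List Int} {i : Nat} {r : Nat} {fi}
    (hi : i < p.length) (hpi : 0 ≤ p.getD i 0) (hr : rr p fi i = some r) :
    ∀ f j x, rr p f j = some x → rr (p.set i (((r : Nat) : Int))) f j = some x := by
  have hroot : p.getD r 0 < 0 := rr_some_root hr
  have hir : i ≠ r := fun he => by rw [he] at hpi; omega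
  have hq : ∀ k, (p.set i (((r : Nat) : Int))).getD k 0 = if k = i ∧ i < p.length then ((r : Nat) : Int) else p.getD k 0 :=
    fun k => getD_set_char p i (((r : Nat) : Int)) 0 k
  intro f
  induction f with
  | zero => intro j x h; simp [rr] at h
  | succ f ih =>
    intro j x h
    rw [rr] at h
    by_cases hjr : p.getD j 0 < 0
    · rw [if_pos hjr] at h
      cases h
      have hji : ¬ (j = i ∧ i < p.length) := fun hh => by rw [hh.1] at hjr; omega
      have hqj : (p.set i (((r : Nat) : Int))).getD j 0 = p.getD j 0 := by rw [hq, if_neg hji]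
      rw [rr, hqj, if_pos hjr]
    · rw [if_neg hjr] at h
      push_neg at hjr
      by_cases hji : j = i
      · rw [hji] at h hjr ⊢
        have hfx : rr p (f+1) i = some x := by rw [rr, if_neg (by omega)]; exact h
        have hx : x = r := rr_det hfx hr
        rw [hx]
        have hqi : (p.set i (((r : Nat) : Int))).getD i 0 = ((r : Nat) : Int) := by
          rw [hq, if_pos ⟨rfl, hi⟩]
        have hqr : (p.set i (((r : Nat) : Int))).getD r 0 = p.getD r 0 := by
          rw [hq, if_neg (fun hh => hir hh.1.symm)]
        cases f with
        | zero => simp [rr] at h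
        | succ f =>
          have h2 : (((r : Nat) : Int)).toNat = r := by simp
          rw [rr, hqi, if_neg (by omega), h2, rr, hqr, if_pos hroot]
      · have hqj : (p.set i (((r : Nat) : Int))).getD j 0 = p.getD j 0 := by
          rw [hq, if_neg (fun hh => hji hh.1)]
        rw [rr, hqj, if_neg (by omega)]
        exact ih _ _ h


theorem getD_neg_in_range {p : List Int} {k : Nat} (h : p.getD k 0 < 0) : k < p.length := by
  by_contra hk
  simp [List.getD, List.getElem?_eq_none (Nat.le_of_not_lt hk)] at h

theorem foldl_set_length (L : List Int) (c : List Int) (v : Int) :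
    (L.foldl (fun cc x => cc.set x.toNat v) c).length = c.length := by
  induction L generalizing c with
  | nil => rfl
  | cons y L ih => rw [List.foldl_cons, ih, List.length_set]

theorem foldl_set_getD (L : List Int) (c : List Int) (v : Int) (k : Nat) :
    (L.foldl (fun cc x => cc.set x.toNat v) c).getD k 0 =
      if k ∈ L.map Int.toNat ∧ k < c.length then v else c.getD k 0 := by
  induction L generalizing c with
  | nil => simp
  | cons y L ih =>
    rw [List.foldl_cons, ih, List.length_set, getD_set_char]
    by_cases h2 : k < c.length
    · by_cases h4 : k = y.toNat
      · by_cases h1 : y.toNat ∈ L.map Int.toNat <;> simp [h4, h1, h2] <;> omega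
      · by_cases h1 : k ∈ L.map Int.toNat <;> simp [h1, h2, h4]
    · have h5 : ¬ (k = y.toNat ∧ y.toNat < c.length) := fun hh => h2 (hh.1 ▸ hh.2)
      simp [h2, h5]

-- After a union step (small root re-pointed at the big root, big root's size
-- entry updated but kept negative), every rr value is just relabelled.
theorem rr_union_shift {p : List Int} {rb rg : Nat} (hne : rg ≠ rb)
    (hrg : p.getD rg 0 < 0) (hrb : p.getD rb 0 < 0) {s : Int} (hs : s < 0) :
    ∀ f j x, rr p f j = some x →
      rr ((p.set rg s).set rb ((rg : Nat) : Int)) (f+1) j = some (if x = rb then rg else x) := by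
  have hrgl : rg < p.length := getD_neg_in_range hrg
  have hrbl : rb < p.length := getD_neg_in_range hrb
  have hq : ∀ k, ((p.set rg s).set rb ((rg : Nat) : Int)).getD k 0 =
      if k = rb then ((rg : Nat) : Int) else if k = rg then s else p.getD k 0 := by
    intro k
    rw [getD_set_char, getD_set_char, List.length_set]
    by_cases h1 : k = rb
    · rw [if_pos ⟨h1, hrbl⟩, if_pos h1]
    · rw [if_neg (fun hh => h1 hh.1), if_neg h1]
      by_cases h2 : k = rg
      · rw [if_pos ⟨h2, hrgl⟩, if_pos h2]
      · rw [if_neg (fun hh => h2 hh.1), if_neg h2]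
  intro f
  induction f with
  | zero => intro j x h; simp [rr] at h
  | succ f ih =>
    intro j x h
    rw [rr] at h
    by_cases hjr : p.getD j 0 < 0
    · rw [if_pos hjr] at h
      cases h
      by_cases hjb : j = rb
      · subst hjb
        rw [if_pos rfl, rr, hq, if_pos rfl, if_neg (by omega), Int.toNat_natCast, rr, hq,
          if_neg (fun hh => hne hh), if_pos rfl, if_pos hs]
      · rw [if_neg hjb, rr, hq, if_neg hjb]
        by_cases hjg : j = rg
        · rw [if_pos hjg, if_pos hs, hjg]
        · rw [if_neg hjg, if_pos hjr]
    · rw [if_neg hjr] at h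
      push_neg at hjr
      have hjb : j ≠ rb := fun he => by rw [he] at hjr; omega
      have hjg : j ≠ rg := fun he => by rw [he] at hjr; omega
      rw [rr, hq, if_neg hjb, if_neg hjg, if_neg (by omega)]
      exact ih _ _ h

-- The full specification of A's find: correct root, localized writes, and
-- preservation of every rr value.
theorem findA_spec {p : List Int} {d : Nat → Nat} (hc : IsCert p d) :
    ∀ f (a : Int) r, 0 ≤ a → a.toNat < p.length → rr p f a.toNat = some r →
      (findA p f a).2 = ((r : Nat) : Int) ∧
      (findA p f a).1.length = p.length ∧
      (∀ k, (findA p f a).1.getD k 0 = p.getD k 0 ∨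
            ((findA p f a).1.getD k 0 = ((r : Nat) : Int) ∧ d k ≤ d a.toNat ∧
             0 ≤ p.getD k 0 ∧ k < p.length ∧ (∃ g, rr p g k = some r))) ∧
      (∀ g j x, rr p g j = some x → rr (findA p f a).1 g j = some x) := by
  intro f
  induction f with
  | zero => intro a r _ _ h; simp [rr] at h
  | succ f ih =>
    intro a r ha0 ha h
    rw [rr] at h
    by_cases hneg : p.getD a.toNat 0 < 0
    · rw [if_pos hneg] at h
      cases h
      rw [findA, if_pos hneg]
      refine ⟨by simp [Int.toNat_of_nonneg ha0], rfl, fun k => Or.inl rfl, fun g j x hx => hx⟩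
    · rw [if_neg hneg] at h
      push_neg at hneg
      obtain ⟨hvl, hvd⟩ := hc a.toNat ha hneg
      have hv0 : 0 ≤ p.getD a.toNat 0 := hneg
      obtain ⟨ih1, ih2, ih3, ih4⟩ := ih (p.getD a.toNat 0) r hv0 hvl h
      rw [findA, if_neg (by omega)]
      simp only [show p[a.toNat]?.getD 0 = p.getD a.toNat 0 from rfl]
      set p1 := (findA p f (p.getD a.toNat 0)).1 with hp1
      set r1 := (findA p f (p.getD a.toNat 0)).2 with hr1e
      have hal1 : a.toNat < p1.length := by rw [ih2]; exact ha
      have hfa : rr p (f+1) a.toNat = some r := by rw [rr, if_neg (by omega)]; exact h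
      have hp1a : 0 ≤ p1.getD a.toNat 0 := by
        rcases ih3 a.toNat with h5 | h5
        · rw [h5]; exact hv0
        · rw [h5.1]; positivity
      have hr1 : rr p1 (f+1) a.toNat = some r := ih4 _ _ _ hfa
      constructor
      · exact ih1
      constructor
      · rw [List.length_set, ih2]
      constructor
      · intro k
        rw [getD_set_char]
        by_cases hk : k = a.toNat ∧ a.toNat < p1.length
        · rw [if_pos hk]
          rcases hk with ⟨rfl, _⟩
          exact Or.inr ⟨ih1, le_refl _, hv0, ha, ⟨f+1, hfa⟩⟩
        · rw [if_neg hk]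
          rcases ih3 k with h5 | h5
          · exact Or.inl h5
          · exact Or.inr ⟨h5.1, by omega, h5.2.2.1, h5.2.2.2.1, h5.2.2.2.2⟩
      · intro g j x hx
        have hx1 := ih4 _ _ _ hx
        have hmain := rr_set_to_root (p := p1) (i := a.toNat) (r := r) hal1 hp1a hr1 g j x hx1
        rw [ih1]
        exact hmain


theorem members_len_le {p c : List Int} {m : List (List Int)} (hI : BInv p c m)
    {l : Nat} (hl : l < p.length) : (m.getD l []).length ≤ p.length := by
  obtain ⟨hc, hm, hR, hC, hM, hS⟩ := hI
  by_cases hlab : c.getD l 0 = (l : Int)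
  · obtain ⟨hnd, hmem⟩ := (hM l hl).1 hlab
    have hinj : ((m.getD l []).map Int.toNat).Nodup := by
      refine List.Nodup.map_on ?_ hnd
      intro x hx y hy hxy
      have hx0 := (hmem x).1 hx
      have hy0 := (hmem y).1 hy
      omega
    have hsub : ((m.getD l []).map Int.toNat).toFinset ⊆ Finset.range p.length := by
      intro t ht
      rw [List.mem_toFinset] at ht
      obtain ⟨x, hx, rfl⟩ := List.mem_map.mp ht
      exact Finset.mem_range.mpr ((hmem x).1 hx).2.1
    have := Finset.card_le_card hsub
    rw [List.toFinset_card_of_nodup hinj, Finset.card_range, List.length_map] at this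
    exact this
  · rw [(hM l hl).2 hlab]
    simp

theorem binv_fix {p c : List Int} {m : List (List Int)} (hI : BInv p c m)
    {i : Nat} (hi : i < p.length) :
    c.getD (c.getD i 0).toNat 0 = c.getD i 0 := by
  obtain ⟨hc, hm, hR, hC, hM, hS⟩ := hI
  obtain ⟨hi0, hir, hirr⟩ := hR i hi
  have hroot : p.getD (c.getD i 0).toNat 0 < 0 := rr_some_root hirr
  have h1 : rr p (p.length + 1) (c.getD i 0).toNat = some (c.getD i 0).toNat := by
    rw [rr, if_pos hroot]
  obtain ⟨hr0, _, hrr2⟩ := hR (c.getD i 0).toNat hir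
  have := rr_det hrr2 h1
  omega

theorem binv_parent_class {p c : List Int} {m : List (List Int)} (hI : BInv p c m)
    {k : Nat} (hk : k < p.length) (hp : 0 ≤ p.getD k 0) :
    c.getD (p.getD k 0).toNat 0 = c.getD k 0 := by
  obtain ⟨hc, hm, hR, ⟨d, hcert, hbnd⟩, hM, hS⟩ := hI
  obtain ⟨hvl, _⟩ := hcert k hk hp
  obtain ⟨hk0, _, hkrr⟩ := hR k hk
  obtain ⟨hv0, _, hvrr⟩ := hR (p.getD k 0).toNat hvl
  have hstep : rr p (p.length + 1) k = rr p p.length (p.getD k 0).toNat := by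
    rw [rr, if_neg (by omega)]
  rw [hstep] at hkrr
  have := rr_det (rr_mono hkrr (Nat.le_succ _)) hvrr
  omega

theorem binv_root_neg_iff {p c : List Int} {m : List (List Int)} (hI : BInv p c m)
    {i : Nat} (hi : i < p.length) :
    p.getD i 0 < 0 ↔ c.getD i 0 = (i : Int) := by
  obtain ⟨hc, hm, hR, hC, hM, hS⟩ := hI
  constructor
  · intro hneg
    obtain ⟨hi0, _, hirr⟩ := hR i hi
    have h1 : rr p (p.length + 1) i = some i := by rw [rr, if_pos hneg]
    have := rr_det hirr h1
    omega
  · intro hlab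
    rw [hS i hi hlab]
    have hmem : (i : Int) ∈ m.getD i [] := by
      refine (((hM i hi).1 hlab).2 (i : Int)).mpr ⟨by omega, by omega, ?_⟩
      simpa using hlab
    have : 0 < (m.getD i []).length := List.length_pos_of_mem hmem
    omega

-- find preserves the invariant and returns the component label.
theorem findA_inv {p c : List Int} {m : List (List Int)} (hI : BInv p c m)
    {a : Int} (ha0 : 0 ≤ a) (ha : a.toNat < p.length) {fu : Nat} (hfu : fu = p.length + 1) :
    (findA p fu a).2 = c.getD a.toNat 0 ∧
    BInv (findA p fu a).1 c m ∧
    (findA p fu a).1.length = p.length ∧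
    (∀ g j x, rr p g j = some x → rr (findA p fu a).1 g j = some x) := by
  obtain ⟨hc, hm, hR, ⟨d, hcert, hbnd⟩, hM, hS⟩ := hI
  obtain ⟨ha0', harl, harr⟩ := hR a.toNat ha
  subst hfu
  obtain ⟨f1, f2, f3, f4⟩ := findA_spec hcert (p.length + 1) a ((c.getD a.toNat 0).toNat) ha0 ha harr
  have hval : (((c.getD a.toNat 0).toNat : Nat) : Int) = c.getD a.toNat 0 := by omega
  have hroots : ∀ k, p.getD k 0 < 0 → (findA p (p.length+1) a).1.getD k 0 = p.getD k 0 := by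
    intro k hk
    rcases f3 k with h5 | h5
    · exact h5
    · omega
  refine ⟨by rw [f1, hval], ⟨?_, ?_, ?_, ?_, ?_, ?_⟩, f2, f4⟩
  · rw [f2]; exact hc
  · rw [f2]; exact hm
  · intro i hi
    rw [f2] at hi
    obtain ⟨h1, h2, h3⟩ := hR i hi
    exact ⟨h1, by omega, by rw [f2]; exact f4 _ _ _ h3⟩
  · refine ⟨d, ?_, ?_⟩
    · intro i hi hpos
      rw [f2] at hi
      rcases f3 i with h5 | h5
      · rw [h5] at hpos ⊢
        obtain ⟨hh1, hh2⟩ := hcert i hi hpos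
        exact ⟨by omega, hh2⟩
      · obtain ⟨hv, hda, hp0, hil, g, hg⟩ := h5
        rw [hv]
        have hlt : d (c.getD a.toNat 0).toNat < d i :=
          (rr_strict_descent hcert hil hg).2 hp0
        constructor
        · omega
        · have h2 : ((((c.getD a.toNat 0).toNat : Nat) : Int)).toNat = (c.getD a.toNat 0).toNat := by omega
          rw [h2]
          exact hlt
    · intro i hi
      rw [f2] at hi
      exact hbnd i hi
  · intro l hl
    rw [f2] at hl ⊢
    exact hM l hl
  · intro l hl hlab
    rw [f2] at hl
    rw [hroots l (by rw [← (binv_root_neg_iff ⟨hc, hm, hR, ⟨d, hcert, hbnd⟩, hM, hS⟩ hl)] at hlab; exact hlab)]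
    exact hS l hl hlab


-- The heart of the bisimulation: A's union of two distinct roots and B's
-- relabel-the-small-class merge preserve the invariant together.
theorem merged_core {p c : List Int} {m : List (List Int)} (hI : BInv p c m)
    {bigT smallT : Nat} (hbl : bigT < p.length) (hsl : smallT < p.length)
    (hne : bigT ≠ smallT)
    (hblab : c.getD bigT 0 = (bigT : Int)) (hslab : c.getD smallT 0 = (smallT : Int)) :
    BInv ((p.set bigT (p.getD bigT 0 + p.getD smallT 0)).set smallT ((bigT : Nat) : Int))
         ((m.getD smallT []).foldl (fun cc x => cc.set x.toNat ((bigT : Nat) : Int)) c)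
         ((m.set bigT (m.getD bigT [] ++ m.getD smallT [])).set smallT []) := by
  obtain ⟨hc, hm, hR, ⟨d, hcert, hbnd⟩, hM, hS⟩ := hI
  have hIfull : BInv p c m := ⟨hc, hm, hR, ⟨d, hcert, hbnd⟩, hM, hS⟩
  set n := p.length with hn
  set p3 := (p.set bigT (p.getD bigT 0 + p.getD smallT 0)).set smallT ((bigT : Nat) : Int) with hp3
  set c' := (m.getD smallT []).foldl (fun cc x => cc.set x.toNat ((bigT : Nat) : Int)) c with hc'
  set m' := (m.set bigT (m.getD bigT [] ++ m.getD smallT [])).set smallT [] with hm'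
  obtain ⟨hndb, hmemb⟩ := (hM bigT hbl).1 hblab
  obtain ⟨hnds, hmems⟩ := (hM smallT hsl).1 hslab
  have hpb : p.getD bigT 0 = -((m.getD bigT []).length) := hS bigT hbl hblab
  have hps : p.getD smallT 0 = -((m.getD smallT []).length) := hS smallT hsl hslab
  have hlbpos : 0 < (m.getD bigT []).length :=
    List.length_pos_of_mem ((hmemb (bigT : Int)).mpr ⟨by omega, by omega, by simpa using hblab⟩)
  have hlspos : 0 < (m.getD smallT []).length :=
    List.length_pos_of_mem ((hmems (smallT : Int)).mpr ⟨by omega, by omega, by simpa using hslab⟩)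
  have hsum : p.getD bigT 0 + p.getD smallT 0 < 0 := by omega
  have hpbneg : p.getD bigT 0 < 0 := by omega
  have hpsneg : p.getD smallT 0 < 0 := by omega
  have hp3len : p3.length = n := by rw [hp3, List.length_set, List.length_set]
  have hc'len : c'.length = n := by rw [hc', foldl_set_length, hc]
  have hm'len : m'.length = n := by rw [hm', List.length_set, List.length_set, hm]
  have pK : ∀ k, p3.getD k 0 =
      if k = smallT then ((bigT : Nat) : Int)
      else if k = bigT then p.getD bigT 0 + p.getD smallT 0 else p.getD k 0 := by
    intro k
    rw [hp3, getD_set_char, getD_set_char, List.length_set]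
    by_cases h1 : k = smallT
    · rw [if_pos ⟨h1, by omega⟩, if_pos h1]
    · rw [if_neg (fun hh => h1 hh.1), if_neg h1]
      by_cases h2 : k = bigT
      · rw [if_pos ⟨h2, by omega⟩, if_pos h2]
      · rw [if_neg (fun hh => h2 hh.1), if_neg h2]
  have hmemiff : ∀ k : Nat, k ∈ (m.getD smallT []).map Int.toNat ↔
      (k < n ∧ c.getD k 0 = (smallT : Int)) := by
    intro k
    constructor
    · intro hk
      obtain ⟨x, hx, rfl⟩ := List.mem_map.mp hk
      obtain ⟨hx0, hx1, hx2⟩ := (hmems x).mp hx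
      exact ⟨hx1, hx2⟩
    · intro ⟨hk1, hk2⟩
      refine List.mem_map.mpr ⟨(k : Int), (hmems (k : Int)).mpr ⟨by omega, by simpa using hk1, by simpa using hk2⟩, by simp⟩
  have cK : ∀ k, c'.getD k 0 =
      if k < n ∧ c.getD k 0 = (smallT : Int) then ((bigT : Nat) : Int) else c.getD k 0 := by
    intro k
    rw [hc', foldl_set_getD, hc]
    by_cases h1 : k < n ∧ c.getD k 0 = (smallT : Int)
    · rw [if_pos ⟨(hmemiff k).mpr h1, h1.1⟩, if_pos h1]
    · rw [if_neg (fun hh => h1 ⟨hh.2, ((hmemiff k).mp hh.1).2⟩), if_neg h1]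
  have mK : ∀ l, m'.getD l [] =
      if l = smallT then []
      else if l = bigT then m.getD bigT [] ++ m.getD smallT [] else m.getD l [] := by
    intro l
    rw [hm', getD_set_char, getD_set_char, List.length_set, hm]
    by_cases h1 : l = smallT
    · rw [if_pos ⟨h1, by omega⟩, if_pos h1]
    · rw [if_neg (fun hh => h1 hh.1), if_neg h1]
      by_cases h2 : l = bigT
      · rw [if_pos ⟨h2, by omega⟩, if_pos h2]
      · rw [if_neg (fun hh => h2 hh.1), if_neg h2]
  have hbns : (bigT : Int) ≠ (smallT : Int) := by omega
  have hcbig : c'.getD bigT 0 = (bigT : Int) := by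
    rw [cK, if_neg (fun hh => hbns (hblab ▸ hh.2))]
    exact hblab
  have hcsmall : c'.getD smallT 0 = (bigT : Int) := by
    rw [cK, if_pos ⟨by omega, hslab⟩]
  -- rr on p3 is the relabelled rr on p
  have hshift : ∀ j, j < n → rr p3 (n + 1) j =
      some (if (c.getD j 0).toNat = smallT then bigT else (c.getD j 0).toNat) := by
    intro j hj
    obtain ⟨hj0, hjl, hjr⟩ := hR j hj
    obtain ⟨x, hx⟩ := rr_of_cert hcert j hj
    have hx' : x = (c.getD j 0).toNat := rr_det hx hjr
    subst hx'
    have hdj : d j < (m.getD (c.getD j 0).toNat []).length := hbnd j hj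
    have hmle : (m.getD (c.getD j 0).toNat []).length ≤ n := members_len_le hIfull hjl
    have := rr_union_shift (p := p) (rb := smallT) (rg := bigT) hne hpbneg hpsneg hsum
      (d j + 1) j ((c.getD j 0).toNat) hx
    exact rr_mono this (by omega)
  refine ⟨by omega, by omega, ?_, ?_, ?_, ?_⟩
  · -- (R)
    intro j hj
    rw [hp3len] at hj
    obtain ⟨hj0, hjl, hjr⟩ := hR j hj
    have hcj := cK j
    by_cases hsm : c.getD j 0 = (smallT : Int)
    · rw [if_pos ⟨hj, hsm⟩] at hcj
      refine ⟨by omega, by omega, ?_⟩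
      rw [hp3len, hshift j hj, hcj]
      congr 1
      rw [if_pos (by omega)]
      omega
    · rw [if_neg (fun hh => hsm hh.2)] at hcj
      refine ⟨by rw [hcj]; omega, by rw [hcj]; omega, ?_⟩
      rw [hp3len, hshift j hj, hcj]
      congr 1
      rw [if_neg (by omega)]
  · -- certificate
    refine ⟨fun j => if c.getD j 0 = (smallT : Int) then d j + d bigT + 1 else d j, ?_, ?_⟩
    · intro k hk hpos
      dsimp only
      rw [hp3len] at hk
      have hpk := pK k
      by_cases h1 : k = smallT
      · subst h1
        rw [if_pos rfl] at hpk
        rw [hpk]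
        have h2 : ((bigT : Int)).toNat = bigT := by omega
        rw [h2, hp3len]
        refine ⟨hbl, ?_⟩
        rw [if_neg (fun hh => hbns (hblab ▸ hh)), if_pos hslab]
        omega
      · rw [if_neg h1] at hpk
        by_cases h2 : k = bigT
        · subst h2
          rw [if_pos rfl] at hpk
          rw [hpk] at hpos
          omega
        · rw [if_neg h2] at hpk
          rw [hpk] at hpos ⊢
          obtain ⟨hvl, hvd⟩ := hcert k hk hpos
          have hclass := binv_parent_class hIfull hk hpos
          rw [hp3len]
          refine ⟨hvl, ?_⟩
          rw [hclass]
          by_cases h3 : c.getD k 0 = (smallT : Int)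
          · rw [if_pos h3, if_pos h3]; omega
          · rw [if_neg h3, if_neg h3]; exact hvd
    · intro j hj
      dsimp only
      rw [hp3len] at hj
      have hcj := cK j
      by_cases hsm : c.getD j 0 = (smallT : Int)
      · rw [if_pos ⟨hj, hsm⟩] at hcj
        rw [if_pos hsm, hcj]
        have h2 : ((bigT : Int)).toNat = bigT := by omega
        rw [h2, mK, if_neg hne, if_pos rfl, List.length_append]
        have hd1 : d j < (m.getD smallT []).length := by
          have := hbnd j hj
          rwa [show (c.getD j 0).toNat = smallT by omega] at this
        have hd2 : d bigT < (m.getD bigT []).length := by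
          have := hbnd bigT hbl
          rwa [show (c.getD bigT 0).toNat = bigT by omega] at this
        omega
      · rw [if_neg (fun hh => hsm hh.2)] at hcj
        rw [if_neg hsm, hcj, mK]
        have hts : (c.getD j 0).toNat ≠ smallT := by
          intro he
          obtain ⟨hj0, _, _⟩ := hR j hj
          exact hsm (by omega)
        rw [if_neg hts]
        by_cases h4 : (c.getD j 0).toNat = bigT
        · rw [if_pos h4, List.length_append]
          have hb5 := hbnd j hj
          rw [h4] at hb5
          omega
        · rw [if_neg h4]
          exact hbnd j hj
  · -- (M)
    intro l hl
    rw [hp3len] at hl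
    constructor
    · intro hlab
      by_cases h1 : l = smallT
      · exfalso
        rw [h1, hcsmall] at hlab
        exact hbns (hlab ▸ rfl)
      · by_cases h2 : l = bigT
        · subst h2
          rw [mK, if_neg hne, if_pos rfl]
          constructor
          · refine List.Nodup.append hndb hnds ?_
            intro x hxb hxs
            have := ((hmemb x).mp hxb).2.2
            have := ((hmems x).mp hxs).2.2
            omega
          · intro x
            rw [List.mem_append, hmemb x, hmems x]
            constructor
            · rintro (⟨hx0, hx1, hx2⟩ | ⟨hx0, hx1, hx2⟩)
              · refine ⟨hx0, by omega, ?_⟩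
                rw [cK, if_neg (fun hh => hbns (hx2 ▸ hh.2))]
                exact hx2
              · refine ⟨hx0, by omega, ?_⟩
                rw [cK, if_pos ⟨hx1, hx2⟩]
            · rintro ⟨hx0, hx1, hx2⟩
              rw [hp3len] at hx1
              rw [cK] at hx2
              by_cases h3 : x.toNat < n ∧ c.getD x.toNat 0 = (smallT : Int)
              · rw [if_pos h3] at hx2
                exact Or.inr ⟨hx0, h3.1, h3.2⟩
              · rw [if_neg h3] at hx2
                exact Or.inl ⟨hx0, hx1, hx2⟩
        · rw [mK, if_neg h1, if_neg h2]
          have hclab : c.getD l 0 = (l : Int) := by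
            rw [cK] at hlab
            by_cases h3 : l < n ∧ c.getD l 0 = (smallT : Int)
            · exfalso; rw [if_pos h3] at hlab; exact h2 (by omega)
            · rwa [if_neg h3] at hlab
          obtain ⟨hnd, hmem⟩ := (hM l hl).1 hclab
          refine ⟨hnd, ?_⟩
          intro x
          rw [hmem x]
          constructor
          · rintro ⟨hx0, hx1, hx2⟩
            refine ⟨hx0, by omega, ?_⟩
            rw [cK, if_neg (fun hh => by rw [hx2] at hh; exact h1 (by omega))]
            exact hx2
          · rintro ⟨hx0, hx1, hx2⟩
            rw [hp3len] at hx1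
            rw [cK] at hx2
            by_cases h3 : x.toNat < n ∧ c.getD x.toNat 0 = (smallT : Int)
            · exfalso; rw [if_pos h3] at hx2; exact h2 (by omega)
            · rw [if_neg h3] at hx2
              exact ⟨hx0, hx1, hx2⟩
    · intro hlab
      by_cases h1 : l = smallT
      · rw [mK, if_pos h1]
      · by_cases h2 : l = bigT
        · exfalso; rw [h2, hcbig] at hlab; exact hlab rfl
        · rw [mK, if_neg h1, if_neg h2]
          refine (hM l hl).2 ?_
          intro hcl
          refine hlab ?_
          rw [cK, if_neg (fun hh => by rw [hcl] at hh; exact h1 (by omega))]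
          exact hcl
  · -- (S)
    intro l hl hlab
    rw [hp3len] at hl
    by_cases h1 : l = smallT
    · exfalso
      rw [h1, hcsmall] at hlab
      exact hbns (hlab ▸ rfl)
    · by_cases h2 : l = bigT
      · subst h2
        rw [pK, if_neg hne, if_pos rfl, mK, if_neg hne, if_pos rfl, List.length_append]
        omega
      · have hclab : c.getD l 0 = (l : Int) := by
          rw [cK] at hlab
          by_cases h3 : l < n ∧ c.getD l 0 = (smallT : Int)
          · exfalso; rw [if_pos h3] at hlab; exact h2 (by omega)
          · rwa [if_neg h3] at hlab
        rw [pK, if_neg h1, if_neg h2, mK, if_neg h1, if_neg h2]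
        exact hS l hl hclab


-- One edge: A's union and B's merge, from the same invariant state.
theorem merge_inv {p c : List Int} {m : List (List Int)} (hI : BInv p c m)
    {a b : Int} (ha0 : 0 ≤ a) (ha : a.toNat < p.length) (hb0 : 0 ≤ b) (hb : b.toNat < p.length) :
    BInv (unionA p a b) (mergeB (c, m) a b).1 (mergeB (c, m) a b).2 ∧
    (unionA p a b).length = p.length := by
  obtain ⟨hfa2, hIp1, hlen1, hpres1⟩ := findA_inv hI ha0 ha rfl
  set p1 := (findA p (p.length + 1) a).1 with hp1
  obtain ⟨hfb2, hIp2, hlen2, hpres2⟩ := findA_inv hIp1 hb0 (by omega) rfl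
  set p2 := (findA p1 (p1.length + 1) b).1 with hp2
  have hlen21 : p2.length = p.length := by omega
  set ca := c.getD a.toNat 0 with hca
  set cb := c.getD b.toNat 0 with hcb
  obtain ⟨hca0, hcal, _⟩ := hI.2.2.1 a.toNat ha
  obtain ⟨hcb0, hcbl, _⟩ := hI.2.2.1 b.toNat hb
  have hcafix : c.getD ca.toNat 0 = ca := binv_fix hI ha
  have hcbfix : c.getD cb.toNat 0 = cb := binv_fix hI hb
  have hcaN : ((ca.toNat : Nat) : Int) = ca := by omega
  have hcbN : ((cb.toNat : Nat) : Int) = cb := by omega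
  by_cases hcc : ca = cb
  · have hU : unionA p a b = p2 := by
      rw [unionA]
      rw [if_pos (by rw [hfa2, hfb2]; exact hcc)]
    have hM : mergeB (c, m) a b = (c, m) := by
      rw [mergeB]
      rw [if_pos hcc]
    rw [hU, hM]
    exact ⟨hIp2, by omega⟩
  · have hcc' : ca.toNat ≠ cb.toNat := by omega
    have hsa : p2.getD ca.toNat 0 = -((m.getD ca.toNat []).length) :=
      hIp2.2.2.2.2.2 ca.toNat (by omega) (by rw [hcafix, hcaN])
    have hsb : p2.getD cb.toNat 0 = -((m.getD cb.toNat []).length) :=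
      hIp2.2.2.2.2.2 cb.toNat (by omega) (by rw [hcbfix, hcbN])
    by_cases hgt : (m.getD cb.toNat []).length < (m.getD ca.toNat []).length
    · have hU : unionA p a b =
          (p2.set ca.toNat (p2.getD ca.toNat 0 + p2.getD cb.toNat 0)).set cb.toNat ca := by
        rw [unionA]
        rw [if_neg (by rw [hfa2, hfb2]; exact hcc), hfa2, hfb2,
          if_pos (by rw [hsa, hsb]; omega)]
      have hM : mergeB (c, m) a b =
          ((m.getD cb.toNat []).foldl (fun cc x => cc.set x.toNat ca) c,
           (m.set ca.toNat (m.getD ca.toNat [] ++ m.getD cb.toNat [])).set cb.toNat []) := by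
        rw [mergeB]
        rw [if_neg hcc, if_pos (by omega)]
      rw [hU, hM]
      have hcore := merged_core hIp2 (bigT := ca.toNat) (smallT := cb.toNat)
        (by omega) (by omega) hcc' (by rw [hcafix, hcaN]) (by rw [hcbfix, hcbN])
      rw [hcaN] at hcore
      exact ⟨hcore, by simp [hlen21]⟩
    · have hU : unionA p a b =
          (p2.set cb.toNat (p2.getD cb.toNat 0 + p2.getD ca.toNat 0)).set ca.toNat cb := by
        rw [unionA]
        rw [if_neg (by rw [hfa2, hfb2]; exact hcc), hfa2, hfb2,
          if_neg (by rw [hsa, hsb]; omega)]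
      have hM : mergeB (c, m) a b =
          ((m.getD ca.toNat []).foldl (fun cc x => cc.set x.toNat cb) c,
           (m.set cb.toNat (m.getD cb.toNat [] ++ m.getD ca.toNat [])).set ca.toNat []) := by
        rw [mergeB]
        rw [if_neg hcc, if_neg (by omega)]
      rw [hU, hM]
      have hcore := merged_core hIp2 (bigT := cb.toNat) (smallT := ca.toNat)
        (by omega) (by omega) (Ne.symm hcc') (by rw [hcbfix, hcbN]) (by rw [hcafix, hcaN])
      rw [hcbN] at hcore
      exact ⟨hcore, by simp [hlen21]⟩

theorem fold_inv : ∀ (fr : List (Int × Int)) (p c : List Int) (m : List (List Int)),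
    BInv p c m →
    (∀ e ∈ fr, 0 ≤ e.1 ∧ e.1.toNat < p.length ∧ 0 ≤ e.2 ∧ e.2.toNat < p.length) →
    BInv (fr.foldl (fun q ab => unionA q ab.1 ab.2) p)
         (fr.foldl (fun st ab => mergeB st ab.1 ab.2) (c, m)).1
         (fr.foldl (fun st ab => mergeB st ab.1 ab.2) (c, m)).2 ∧
    (fr.foldl (fun q ab => unionA q ab.1 ab.2) p).length = p.length := by
  intro fr
  induction fr with
  | nil => intro p c m hI hE; exact ⟨hI, rfl⟩
  | cons e fr ih =>
    intro p c m hI hE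
    obtain ⟨he1, he2, he3, he4⟩ := hE e List.mem_cons_self
    obtain ⟨hI', hlen'⟩ := merge_inv hI he1 he2 he3 he4
    rw [List.foldl_cons, List.foldl_cons, ← Prod.mk.eta (p := mergeB (c, m) e.1 e.2)]
    obtain ⟨hI2, hlen2⟩ := ih (unionA p e.1 e.2) (mergeB (c, m) e.1 e.2).1
      (mergeB (c, m) e.1 e.2).2 hI'
      (fun e' he' => by
        obtain ⟨h1, h2, h3, h4⟩ := hE e' (List.mem_cons_of_mem _ he')
        exact ⟨h1, by omega, h3, by omega⟩)
    exact ⟨hI2, by omega⟩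

theorem init_idx (N : Int) {i : Nat} (hi : i < (N+1).toNat) :
    (PySem.List.pyRange 0 (N+1) 1)[i]? = some ((i : Nat) : Int) := by
  rw [PySem.List.pyRange_one]
  rw [List.getElem?_map, List.getElem?_eq_getElem (by simpa using (by omega : i < ((N+1) - 0).toNat))]
  simp

theorem init_inv (N : Int) :
    BInv (List.replicate (N+1).toNat (-1)) (PySem.List.pyRange 0 (N+1) 1)
         ((PySem.List.pyRange 0 (N+1) 1).map (fun i => [i])) := by
  set n := (N+1).toNat with hn
  have hlenp : (List.replicate n (-1 : Int)).length = n := List.length_replicate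
  have hlenc : (PySem.List.pyRange 0 (N+1) 1).length = n := by
    rw [PySem.List.length_pyRange_one]; omega
  have hcg : ∀ i : Nat, i < n → (PySem.List.pyRange 0 (N+1) 1).getD i 0 = (i : Int) := by
    intro i hi
    rw [List.getD, init_idx N (by omega)]
    rfl
  have hpg : ∀ i : Nat, i < n → (List.replicate n (-1 : Int)).getD i 0 = -1 := by
    intro i hi
    rw [List.getD]
    simp [List.getElem?_replicate, hi]
  have hmg : ∀ i : Nat, i < n →
      ((PySem.List.pyRange 0 (N+1) 1).map (fun i => [i])).getD i [] = [(i : Int)] := by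
    intro i hi
    rw [List.getD, List.getElem?_map, init_idx N (by omega)]
    rfl
  refine ⟨by omega, by simp [hlenc], ?_, ?_, ?_, ?_⟩
  · intro i hi
    rw [hlenp] at hi
    rw [hcg i hi]
    refine ⟨by omega, by omega, ?_⟩
    rw [rr, if_pos (by rw [hpg i (by omega)]; omega)]
    simp
  · refine ⟨fun _ => 0, ?_, ?_⟩
    · intro i hi hpos
      rw [hlenp] at hi
      rw [hpg i hi] at hpos
      omega
    · intro i hi
      rw [hlenp] at hi
      rw [hcg i hi, show ((i : Int)).toNat = i by omega, hmg i hi]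
      simp
  · intro l hl
    rw [hlenp] at hl
    constructor
    · intro _
      rw [hmg l hl]
      refine ⟨List.nodup_singleton _, ?_⟩
      intro x
      simp only [List.mem_singleton]
      constructor
      · rintro rfl
        exact ⟨by omega, by rw [hlenp]; omega, by rw [show ((l : Int)).toNat = l by omega, hcg l hl]⟩
      · rintro ⟨hx0, hx1, hx2⟩
        rw [hlenp] at hx1
        rw [hcg x.toNat hx1] at hx2
        omega
    · intro hlab
      exact absurd (hcg l hl) hlab
  · intro l hl hlab
    rw [hlenp] at hl
    rw [hpg l hl, hmg l hl]
    simp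

theorem my_foldl_congr {α β : Type} (l : List α) (f g : β → α → β) (init : β)
    (h : ∀ acc x, x ∈ l → f acc x = g acc x) : l.foldl f init = l.foldl g init := by
  induction l generalizing init with
  | nil => rfl
  | cons y l ih =>
    rw [List.foldl_cons, List.foldl_cons, h init y List.mem_cons_self]
    exact ih _ (fun acc x hx => h acc x (List.mem_cons_of_mem _ hx))

theorem case_eq (N : Int) (fr : List (Int × Int))
    (hE : ∀ e ∈ fr, 0 ≤ e.1 ∧ e.1 ≤ N ∧ 0 ≤ e.2 ∧ e.2 ≤ N) :
    caseA N fr = caseB N fr := by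
  have hE' : ∀ e ∈ fr, 0 ≤ e.1 ∧ e.1.toNat < (List.replicate (N+1).toNat (-1 : Int)).length ∧
      0 ≤ e.2 ∧ e.2.toNat < (List.replicate (N+1).toNat (-1 : Int)).length := by
    intro e he
    obtain ⟨h1, h2, h3, h4⟩ := hE e he
    rw [List.length_replicate]
    exact ⟨h1, by omega, h3, by omega⟩
  obtain ⟨hI, hlen⟩ := fold_inv fr _ _ _ (init_inv N) hE'
  rw [List.length_replicate] at hlen
  rw [caseA, caseB]
  apply my_foldl_congr
  intro acc x hx
  obtain ⟨hx1, hx2⟩ := PySem.List.mem_pyRange_one.mp hx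
  have hxl : x.toNat < (fr.foldl (fun q ab => unionA q ab.1 ab.2) (List.replicate (N+1).toNat (-1))).length := by
    rw [hlen]; omega
  have hiff := binv_root_neg_iff hI hxl
  have hxN : ((x.toNat : Nat) : Int) = x := by omega
  by_cases hcond : (fr.foldl (fun st ab => mergeB st ab.1 ab.2)
      (PySem.List.pyRange 0 (N+1) 1, (PySem.List.pyRange 0 (N+1) 1).map (fun i => [i]))).1.getD x.toNat 0 = x
  · rw [if_pos hcond, if_pos (hiff.mpr (by rw [← hxN] at hcond; exact hcond))]
    have hs := hI.2.2.2.2.2 x.toNat hxl (by rw [← hxN] at hcond; exact hcond)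
    rw [hs]
    simp
  · rw [if_neg hcond, if_neg (fun hneg => hcond (by rw [hiff.mp hneg, hxN]))]

theorem top_fold (tcs : List (Int × Int × (List (Int × Int)))) (acc : List (Int × Int))
    (hP : ∀ cse ∈ tcs, ∀ e ∈ cse.2.2, 0 ≤ e.1 ∧ e.1 ≤ cse.1 ∧ 0 ≤ e.2 ∧ e.2 ≤ cse.1) :
    tcs.foldl (fun res c => res ++ [caseA c.1 c.2.2]) acc =
    tcs.foldl (fun res c => res ++ [caseB c.1 c.2.2]) acc := by
  induction tcs generalizing acc with
  | nil => rfl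
  | cons cse tcs ih =>
    rw [List.foldl_cons, List.foldl_cons,
      case_eq cse.1 cse.2.2 (hP cse List.mem_cons_self)]
    exact ih _ (fun c hc => hP c (List.mem_cons_of_mem _ hc))

-- ===== VERDICT (by name: the statement is the Claim_ definition above) =====
theorem calculate_fire_escape_routes_spec : Claim_equal_calculate_fire_escape_routes := by
  intro T tcs _ hpre
  unfold Spec_calculate_fire_escape_routes
  unfold calculate_fire_escape_routes calculate_fire_escape_routes_alt
  exact top_fold tcs [] hpre
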